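-- pv_equiv track=rewrite | github.com/mdzgr/MERGE | vizualize.py | get_position_wise_common_tokens
-- ===== SOURCE A (Python) =====
-- def get_tokens_for_position(sentence_data, token_pos):
--     """Get all suggestion tokens for a specific token position"""
--     tokens = set()
--     if token_pos in sentence_data:
--         for score_key in sentence_data[token_pos]:
--             for suggestion in sentence_data[token_pos][score_key]:
--                 token = suggestion.split(':')[0]
--                 tokens.add(token)
--     return tokens
--
-- def get_position_wise_common_tokens(data1, data2):
--     """Get common tokens per position between two sentences, return dict of position -> common_tokens"""
--     all_positions = set(data1.keys()) | set(data2.keys())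
--     position_common = {}
--
--     for pos in all_positions:
--         tokens1 = get_tokens_for_position(data1, pos)
--         tokens2 = get_tokens_for_position(data2, pos)
--         common_tokens = tokens1 & tokens2
--         position_common[pos] = common_tokens
--
--     return position_common
-- ===== SOURCE B (Python) =====
-- def get_position_wise_common_tokens(data1, data2):
--     """Flatten each nested dict into one global set of (position, token) pairs,
--     intersect the two pair sets once, and group the surviving pairs by position
--     into a dict pre-seeded with empty sets for every position of either input."""
--     def pair_set(data):
--         return {(pos, s.split(':')[0])
--                 for pos, scores in data.items()
--                 for suggestions in scores.values()
--                 for s in suggestions}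
--     common = pair_set(data1) & pair_set(data2)
--     result = {pos: set() for pos in data1}
--     for pos in data2:
--         result.setdefault(pos, set())
--     for pos, token in common:
--         result[pos].add(token)
--     return result
-- ===== Notes on version B (the rewrite author's own statement) =====
-- stated objective: alternative
-- what changed: B flattens each nested dict into one global set of (position, token) pairs, computes a single set intersection of the two pair sets, and then groups the surviving pairs by position into a result dict pre-seeded with empty sets for all union positions, instead of A's per-position construction and intersection of token sets over the key union.
import Mathlib
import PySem

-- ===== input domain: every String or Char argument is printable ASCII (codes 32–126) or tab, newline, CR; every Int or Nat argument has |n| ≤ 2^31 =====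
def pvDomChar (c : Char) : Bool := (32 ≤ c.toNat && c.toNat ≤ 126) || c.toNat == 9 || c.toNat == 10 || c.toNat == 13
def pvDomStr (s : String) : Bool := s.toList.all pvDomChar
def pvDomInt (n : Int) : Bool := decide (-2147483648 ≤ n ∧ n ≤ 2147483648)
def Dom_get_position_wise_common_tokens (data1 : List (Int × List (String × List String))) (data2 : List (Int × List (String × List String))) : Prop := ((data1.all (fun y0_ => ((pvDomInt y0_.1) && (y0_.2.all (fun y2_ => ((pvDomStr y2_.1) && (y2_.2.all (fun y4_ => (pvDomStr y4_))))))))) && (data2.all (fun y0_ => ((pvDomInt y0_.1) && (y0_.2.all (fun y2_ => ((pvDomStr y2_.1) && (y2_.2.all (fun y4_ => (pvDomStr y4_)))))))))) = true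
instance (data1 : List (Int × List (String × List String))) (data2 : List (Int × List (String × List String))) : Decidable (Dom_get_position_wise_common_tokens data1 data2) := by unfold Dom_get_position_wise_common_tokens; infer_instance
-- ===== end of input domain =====

-- B replaces A's per-position token-set construction and intersection by ONE global set of
-- (position, token) pairs per input, a single pair-set intersection, and a group-by pass into
-- a dict pre-seeded with empty sets (objective: alternative algorithm, same asymptotic cost).

-- ===== PORT A =====
-- suggestion.split(':')[0] (split on a nonempty separator is nonempty, so index 0 is in range)
def pvTok (s : String) : String :=
  PySem.List.pyGetD ((PySem.Str.split? s ":").getD []) 0 ""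

def get_tokens_for_position (sentence_data : List (Int × List (String × List String))) (token_pos : Int) : PySem.Set String :=
  if (PySem.Dict.mk sentence_data).contains token_pos then
    -- for score_key in sentence_data[token_pos]: for suggestion in sentence_data[token_pos][score_key]: tokens.add(...)
    let scores := (PySem.Dict.mk sentence_data).getD token_pos []
    (scores.map Prod.fst).foldl
      (fun toks score_key =>
        ((PySem.Dict.mk scores).getD score_key []).foldl
          (fun t suggestion => PySem.Set.add t (pvTok suggestion)) toks)
      PySem.Set.empty
  else PySem.Set.empty

def get_position_wise_common_tokens (data1 : List (Int × List (String × List String))) (data2 : List (Int × List (String × List String))) : List (Int × List String) :=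
  let all_positions := PySem.Set.union (PySem.Set.ofList (data1.map Prod.fst)) (data2.map Prod.fst)
  (all_positions.foldl
      (fun position_common pos =>
        position_common.insert pos
          (PySem.Set.inter (get_tokens_for_position data1 pos) (get_tokens_for_position data2 pos)))
      PySem.Dict.empty).items

-- ===== PORT B =====
-- {(pos, s.split(':')[0]) for pos, scores in data.items() for suggestions in scores.values() for s in suggestions}
def pvPairSet (data : List (Int × List (String × List String))) : PySem.Set (Int × String) :=
  data.foldl
    (fun P pr =>
      pr.2.foldl
        (fun P kv => kv.2.foldl (fun P s => PySem.Set.add P (pr.1, pvTok s)) P) P)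
    PySem.Set.empty

def get_position_wise_common_tokens_alt (data1 : List (Int × List (String × List String))) (data2 : List (Int × List (String × List String))) : List (Int × List String) :=
  let common := PySem.Set.inter (pvPairSet data1) (pvPairSet data2)
  -- result = {pos: set() for pos in data1}
  let result := data1.foldl (fun r pr => r.insert pr.1 PySem.Set.empty) PySem.Dict.empty
  -- for pos in data2: result.setdefault(pos, set())
  let result := data2.foldl (fun r pr => r.setdefault pr.1 PySem.Set.empty) result
  -- for pos, token in common: result[pos].add(token)   (pos is always a key of result;
  -- Dict.modify with default empty coincides with Python's in-place add at a present key)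
  let result := common.foldl
    (fun r q => r.modify q.1 PySem.Set.empty (fun t => PySem.Set.add t q.2)) result
  result.items

-- ===== PRECONDITION & SPEC =====
-- Pre_ requires distinct keys in each dict (outer positions and inner score keys): the
-- arguments model Python dicts, which can never hold duplicate keys, so nothing a Python
-- caller can pass is excluded.
def Pre_get_position_wise_common_tokens (data1 : List (Int × List (String × List String))) (data2 : List (Int × List (String × List String))) : Prop :=
  (data1.map Prod.fst).Nodup ∧ (data2.map Prod.fst).Nodup ∧
  (∀ pr ∈ data1, (pr.2.map Prod.fst).Nodup) ∧ (∀ pr ∈ data2, (pr.2.map Prod.fst).Nodup)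
instance (data1 : List (Int × List (String × List String))) (data2 : List (Int × List (String × List String))) : Decidable (Pre_get_position_wise_common_tokens data1 data2) := by unfold Pre_get_position_wise_common_tokens; infer_instance

def pvWitness_get_position_wise_common_tokens : (List (Int × List (String × List String))) × (List (Int × List (String × List String))) :=
  ([(0, [("s1", ["x:1", "y:2"])]), (2, [])], [(0, [("s2", ["x:3"])])])

def Spec_get_position_wise_common_tokens (data1 : List (Int × List (String × List String))) (data2 : List (Int × List (String × List String))) (out : List (Int × List String)) : Prop := out = get_position_wise_common_tokens_alt data1 data2
instance (data1 : List (Int × List (String × List String))) (data2 : List (Int × List (String × List String))) (out : List (Int × List String)) : Decidable (Spec_get_position_wise_common_tokens data1 data2 out) := by unfold Spec_get_position_wise_common_tokens; infer_instance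

-- ===== CLAIM (what is proved, stated in full; the proofs are below) =====
def Claim_equal_get_position_wise_common_tokens : Prop := ∀ (data1 : List (Int × List (String × List String))) (data2 : List (Int × List (String × List String))), Dom_get_position_wise_common_tokens data1 data2 → Pre_get_position_wise_common_tokens data1 data2 → Spec_get_position_wise_common_tokens data1 data2 (get_position_wise_common_tokens data1 data2)

-- ===== LEMMAS AND PROOFS =====

-- B's inner tokens loop, as a named function
def pvF (scores : List (String × List String)) : PySem.Set String :=
  scores.foldl (fun tokens kv => kv.2.foldl (fun t s => PySem.Set.add t (pvTok s)) tokens)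
    PySem.Set.empty

-- A's key-then-lookup inner loop computes the direct items fold when the inner keys are distinct
lemma innerEq (scores : List (String × List String)) (h : (scores.map Prod.fst).Nodup) :
    (scores.map Prod.fst).foldl
      (fun toks score_key =>
        ((PySem.Dict.mk scores).getD score_key []).foldl
          (fun t suggestion => PySem.Set.add t (pvTok suggestion)) toks)
      PySem.Set.empty = pvF scores := by
  unfold pvF
  rw [List.foldl_map]
  apply PySem.List.foldl_congr_mem
  intro acc pr hpr
  have : (PySem.Dict.mk scores).getD pr.1 [] = pr.2 := by
    apply PySem.Dict.getD_of_mem_items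
    · simpa using hpr
    · simpa using h
  rw [this]

-- A's helper on a dict with distinct outer keys, at a present key
lemma tokensFor_mem (data : List (Int × List (String × List String))) (pr : Int × List (String × List String))
    (hnd : (data.map Prod.fst).Nodup) (hpr : pr ∈ data) (hin : (pr.2.map Prod.fst).Nodup) :
    get_tokens_for_position data pr.1 = pvF pr.2 := by
  have hget : (PySem.Dict.mk data).get? pr.1 = some pr.2 := by
    apply PySem.Dict.get?_of_mem_items
    · simpa using hpr
    · simpa using hnd
  have hcon : (PySem.Dict.mk data).contains pr.1 = true := by
    rw [PySem.Dict.contains_eq_isSome_get?, hget]; rfl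
  unfold get_tokens_for_position
  rw [if_pos hcon]
  simp only [PySem.Dict.getD_eq_get?_getD, hget, Option.getD_some]
  exact innerEq pr.2 hin

-- A's helper at an absent key
lemma tokensFor_absent (data : List (Int × List (String × List String))) (pos : Int)
    (h : pos ∉ data.map Prod.fst) : get_tokens_for_position data pos = PySem.Set.empty := by
  have hcon : (PySem.Dict.mk data).contains pos = false := by
    rw [PySem.Dict.contains_eq_decide_mem_keys]
    simpa using h
  unfold get_tokens_for_position
  rw [if_neg (by simp [hcon])]

-- the flat list of tokens of one inner dict, in suggestion order
def flatToks (scores : List (String × List String)) : List String :=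
  scores.flatMap (fun kv => kv.2.map pvTok)

-- the flat list of (position, token) pairs of one input, in iteration order
def flatPairs (data : List (Int × List (String × List String))) : List (Int × String) :=
  data.flatMap (fun pr => (flatToks pr.2).map (fun t => (pr.1, t)))

lemma pvF_eq_ofList (scores : List (String × List String)) :
    pvF scores = PySem.Set.ofList (flatToks scores) := by
  unfold pvF flatToks
  rw [PySem.Set.ofList_eq_foldl, List.foldl_flatMap]
  simp only [List.foldl_map]
  rfl

lemma pvPairSet_eq (data : List (Int × List (String × List String))) :
    pvPairSet data = PySem.Set.ofList (flatPairs data) := by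
  unfold pvPairSet flatPairs flatToks
  rw [PySem.Set.ofList_eq_foldl, List.foldl_flatMap]
  simp only [List.foldl_map, List.foldl_flatMap]
  rfl

-- filtering commutes with Set.add
lemma filter_add {α : Type} [BEq α] [LawfulBEq α] (s : PySem.Set α) (x : α) (p : α → Bool) :
    (PySem.Set.add s x).filter p
      = if p x then PySem.Set.add (s.filter p) x else s.filter p := by
  by_cases hx : x ∈ s
  · rw [PySem.Set.add_of_mem hx]
    by_cases hp : p x
    · rw [if_pos hp, PySem.Set.add_of_mem (List.mem_filter.mpr ⟨hx, hp⟩)]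
    · rw [if_neg hp]
  · rw [PySem.Set.add_of_not_mem hx, List.filter_append]
    by_cases hp : p x
    · rw [if_pos hp, PySem.Set.add_of_not_mem (fun h => hx (List.mem_filter.mp h).1)]
      simp [hp]
    · simp [hp]

-- filtering commutes with a fold of Set.add
lemma filter_foldl_add {α : Type} [BEq α] [LawfulBEq α] (L : List α) (s : PySem.Set α) (p : α → Bool) :
    (L.foldl PySem.Set.add s).filter p = (L.filter p).foldl PySem.Set.add (s.filter p) := by
  induction L generalizing s with
  | nil => rfl
  | cons x L ih =>
    rw [List.foldl_cons, ih, List.filter_cons, filter_add]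
    by_cases hp : p x <;> simp [hp]

lemma ofList_filter {α : Type} [BEq α] [LawfulBEq α] (L : List α) (p : α → Bool) :
    (PySem.Set.ofList L).filter p = PySem.Set.ofList (L.filter p) := by
  rw [PySem.Set.ofList_eq_foldl, PySem.Set.ofList_eq_foldl, filter_foldl_add]
  rfl

-- set(l.map (pos, ·)) = set(l).map (pos, ·)
lemma ofList_map_pair (pos : Int) (l : List String) :
    PySem.Set.ofList (l.map (fun t => (pos, t)))
      = (PySem.Set.ofList l).map (fun t => (pos, t)) := by
  induction l with
  | nil => rfl
  | cons x l ih =>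
    rw [List.map_cons, PySem.Set.ofList_cons, PySem.Set.ofList_cons, ih, List.map_cons]
    congr 1
    show ((PySem.Set.ofList l).map (fun t => (pos, t))).filter (fun y => !(y == (pos, x)))
        = ((PySem.Set.ofList l).filter (fun y => !(y == x))).map (fun t => (pos, t))
    rw [List.filter_map]
    congr 1
    apply List.filter_congr
    intro t _
    simp

-- the pair set restricted to one position: present key
lemma flatPairs_filter_mem (data : List (Int × List (String × List String)))
    (pr : Int × List (String × List String))
    (hnd : (data.map Prod.fst).Nodup) (hpr : pr ∈ data) :
    (flatPairs data).filter (fun q => q.1 == pr.1)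
      = (flatToks pr.2).map (fun t => (pr.1, t)) := by
  induction data with
  | nil => cases hpr
  | cons hd rest ih =>
    have hnd' : hd.1 ∉ rest.map Prod.fst ∧ (rest.map Prod.fst).Nodup := by
      rw [List.map_cons, List.nodup_cons] at hnd; exact hnd
    rw [show flatPairs (hd :: rest)
        = (flatToks hd.2).map (fun t => (hd.1, t)) ++ flatPairs rest from rfl,
      List.filter_append]
    rcases List.mem_cons.mp hpr with h | h
    · subst h
      have h1 : ((flatToks pr.2).map (fun t => (pr.1, t))).filter (fun q => q.1 == pr.1)
          = (flatToks pr.2).map (fun t => (pr.1, t)) := by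
        apply List.filter_eq_self.mpr
        intro q hq
        obtain ⟨t, _, rfl⟩ := List.mem_map.mp hq
        simp
      have h2 : (flatPairs rest).filter (fun q => q.1 == pr.1) = [] := by
        apply List.filter_eq_nil_iff.mpr
        intro q hq
        obtain ⟨pr', hpr', hq'⟩ := List.mem_flatMap.mp hq
        obtain ⟨t, _, rfl⟩ := List.mem_map.mp hq'
        have : pr'.1 ≠ pr.1 := by
          intro he
          apply hnd'.1
          rw [← he]
          exact List.mem_map.mpr ⟨pr', hpr', rfl⟩
        simpa using this
      rw [h1, h2, List.append_nil]
    · have hne : hd.1 ≠ pr.1 := by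
        intro he
        apply hnd'.1
        rw [he]
        exact List.mem_map.mpr ⟨pr, h, rfl⟩
      have h1 : ((flatToks hd.2).map (fun t => (hd.1, t))).filter (fun q => q.1 == pr.1) = [] := by
        apply List.filter_eq_nil_iff.mpr
        intro q hq
        obtain ⟨t, _, rfl⟩ := List.mem_map.mp hq
        simpa using hne
      rw [h1, List.nil_append]
      exact ih hnd'.2 h

-- the pair set restricted to one position: absent key
lemma flatPairs_filter_absent (data : List (Int × List (String × List String))) (pos : Int)
    (h : pos ∉ data.map Prod.fst) :
    (flatPairs data).filter (fun q => q.1 == pos) = [] := by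
  apply List.filter_eq_nil_iff.mpr
  intro q hq
  obtain ⟨pr, hpr, hq'⟩ := List.mem_flatMap.mp hq
  obtain ⟨t, _, rfl⟩ := List.mem_map.mp hq'
  have : pr.1 ≠ pos := fun he => h (he ▸ List.mem_map.mpr ⟨pr, hpr, rfl⟩)
  simpa using this

lemma pairSet_filter_mem (data : List (Int × List (String × List String)))
    (pr : Int × List (String × List String))
    (hnd : (data.map Prod.fst).Nodup) (hpr : pr ∈ data) :
    (pvPairSet data).filter (fun q => q.1 == pr.1) = (pvF pr.2).map (fun t => (pr.1, t)) := by
  rw [pvPairSet_eq, ofList_filter, flatPairs_filter_mem data pr hnd hpr,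
    ofList_map_pair, pvF_eq_ofList]

lemma pairSet_filter_absent (data : List (Int × List (String × List String))) (pos : Int)
    (h : pos ∉ data.map Prod.fst) :
    (pvPairSet data).filter (fun q => q.1 == pos) = [] := by
  rw [pvPairSet_eq, ofList_filter, flatPairs_filter_absent data pos h]
  rfl

-- membership of (pos, tok) in the pair set decides tok's membership in A's per-position set
lemma containsPair (data : List (Int × List (String × List String)))
    (hnd : (data.map Prod.fst).Nodup) (hin : ∀ pr ∈ data, (pr.2.map Prod.fst).Nodup)
    (pos : Int) (tok : String) :
    PySem.Set.contains (pvPairSet data) (pos, tok)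
      = PySem.Set.contains (get_tokens_for_position data pos) tok := by
  have key : (pos, tok) ∈ pvPairSet data ↔ tok ∈ get_tokens_for_position data pos := by
    by_cases h : pos ∈ data.map Prod.fst
    · obtain ⟨pr, hpr, hfst⟩ := List.mem_map.mp h
      subst hfst
      rw [tokensFor_mem data pr hnd hpr (hin pr hpr)]
      constructor
      · intro hm
        have : (pr.1, tok) ∈ (pvPairSet data).filter (fun q => q.1 == pr.1) :=
          List.mem_filter.mpr ⟨hm, by simp⟩
        rw [pairSet_filter_mem data pr hnd hpr] at this
        obtain ⟨t, ht, he⟩ := List.mem_map.mp this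
        cases he
        exact ht
      · intro hm
        have : (pr.1, tok) ∈ (pvPairSet data).filter (fun q => q.1 == pr.1) := by
          rw [pairSet_filter_mem data pr hnd hpr]
          exact List.mem_map.mpr ⟨tok, hm, rfl⟩
        exact (List.mem_filter.mp this).1
    · rw [tokensFor_absent data pos h]
      constructor
      · intro hm
        have : (pos, tok) ∈ (pvPairSet data).filter (fun q => q.1 == pos) :=
          List.mem_filter.mpr ⟨hm, by simp⟩
        rw [pairSet_filter_absent data pos h] at this
        cases this
      · intro hm; cases hm
  by_cases hm : (pos, tok) ∈ pvPairSet data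
  · rw [(PySem.Set.contains_iff _ _).mpr hm, ((PySem.Set.contains_iff _ _).mpr (key.mp hm)).symm]
  · have h1 : PySem.Set.contains (pvPairSet data) (pos, tok) = false := by
      have := mt (PySem.Set.contains_iff _ _).mp hm
      simpa using this
    have h2 : PySem.Set.contains (get_tokens_for_position data pos) tok = false := by
      have := mt (PySem.Set.contains_iff _ _).mp (fun hm' => hm (key.mpr hm'))
      simpa using this
    rw [h1, h2]

-- the grouping fold of B, read off at one key
lemma getD_group (L : List (Int × String)) (d : PySem.Dict Int (PySem.Set String)) (c : Int) :
    (L.foldl (fun r q => r.modify q.1 PySem.Set.empty (fun t => PySem.Set.add t q.2)) d).getD c PySem.Set.empty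
      = (L.filter (fun q => q.1 == c)).foldl (fun t q => PySem.Set.add t q.2) (d.getD c PySem.Set.empty) := by
  induction L generalizing d with
  | nil => rfl
  | cons q L ih =>
    rw [List.foldl_cons, ih, List.filter_cons, PySem.Dict.getD_modify]
    by_cases hq : q.1 = c
    · simp [hq]
    · simp [hq, Ne.symm hq]

-- the conditional fill loop of B appends exactly the not-yet-present keys, in order
lemma fill_loop (L : List Int) (r : PySem.Dict Int (PySem.Set String)) (hL : L.Nodup) :
    (L.foldl (fun r pos => r.setdefault pos PySem.Set.empty) r).items
      = r.items ++ (L.filter (fun pos => !(r.contains pos))).map (fun pos => (pos, PySem.Set.empty)) := by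
  induction L generalizing r with
  | nil => simp
  | cons k rest ih =>
    simp only [List.foldl_cons]
    by_cases hk : r.contains k = true
    · rw [PySem.Dict.setdefault_of_contains _ _ hk, ih r hL.of_cons, List.filter_cons]
      simp [hk]
    · have hk' : r.contains k = false := by simpa using hk
      rw [PySem.Dict.setdefault_of_not_contains _ _ hk',
        ih (r.insert k PySem.Set.empty) hL.of_cons, List.filter_cons]
      have hfilter : rest.filter (fun pos => !((r.insert k PySem.Set.empty).contains pos))
          = rest.filter (fun pos => !(r.contains pos)) := by
        apply List.filter_congr
        intro x hx
        have hxk : x ≠ k := by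
          intro he; subst he; exact (List.nodup_cons.mp hL).1 hx
        rw [PySem.Dict.contains_insert]
        simp [hxk]
      rw [hfilter]
      simp [PySem.Dict.items_insert, hk']

theorem union_positions (ks1 ks2 : List Int) (h1 : ks1.Nodup) (h2 : ks2.Nodup) :
    PySem.Set.union (PySem.Set.ofList ks1) ks2
      = ks1 ++ ks2.filter (fun y => !(PySem.Set.contains ks1 y)) := by
  have : PySem.Set.union (PySem.Set.ofList ks1) ks2
      = PySem.Set.update (PySem.Set.ofList ks1) ks2 := rfl
  rw [this, PySem.Set.update_eq_append_filter]
  simp [PySem.Set.ofList_eq_self_of_nodup, h1, h2]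

-- B's grouped value at pos equals A's intersection at pos
lemma value_eq (data1 data2 : List (Int × List (String × List String)))
    (h1 : (data1.map Prod.fst).Nodup) (h2 : (data2.map Prod.fst).Nodup)
    (hin1 : ∀ pr ∈ data1, (pr.2.map Prod.fst).Nodup)
    (hin2 : ∀ pr ∈ data2, (pr.2.map Prod.fst).Nodup) (pos : Int) :
    ((PySem.Set.inter (pvPairSet data1) (pvPairSet data2)).filter (fun q => q.1 == pos)).foldl
        (fun t q => PySem.Set.add t q.2) PySem.Set.empty
      = PySem.Set.inter (get_tokens_for_position data1 pos) (get_tokens_for_position data2 pos) := by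
  have hinter : PySem.Set.inter (pvPairSet data1) (pvPairSet data2)
      = (pvPairSet data1).filter (fun q => PySem.Set.contains (pvPairSet data2) q) := by
    simp [PySem.Set.inter]
  rw [hinter, List.filter_comm]
  by_cases h : pos ∈ data1.map Prod.fst
  · obtain ⟨pr, hpr, hfst⟩ := List.mem_map.mp h
    subst hfst
    rw [pairSet_filter_mem data1 pr h1 hpr, List.filter_map]
    have hcongr : (pvF pr.2).filter ((fun q => PySem.Set.contains (pvPairSet data2) q) ∘ (fun t => (pr.1, t)))
        = (pvF pr.2).filter (fun t => PySem.Set.contains (get_tokens_for_position data2 pr.1) t) := by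
      apply List.filter_congr
      intro t _
      exact containsPair data2 h2 hin2 pr.1 t
    rw [hcongr, List.foldl_map]
    have hfold : ∀ (l : List String) (s : PySem.Set String),
        l.foldl (fun t x => PySem.Set.add t x) s = l.foldl PySem.Set.add s := fun _ _ => rfl
    have hnodup : ((pvF pr.2).filter (fun t => PySem.Set.contains (get_tokens_for_position data2 pr.1) t)).Nodup := by
      apply List.Nodup.filter
      rw [pvF_eq_ofList]
      exact PySem.Set.nodup_ofList _
    rw [hfold, show (PySem.Set.empty : PySem.Set String) = ([] : List String) from rfl,
      ← PySem.Set.ofList_eq_foldl, PySem.Set.ofList_eq_self_of_nodup _ hnodup,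
      tokensFor_mem data1 pr h1 hpr (hin1 pr hpr)]
    simp [PySem.Set.inter]
  · rw [pairSet_filter_absent data1 pos h, tokensFor_absent data1 pos h]
    rfl

-- ===== VERDICT (by name: the statement is the Claim_ definition above) =====
theorem get_position_wise_common_tokens_spec : Claim_equal_get_position_wise_common_tokens := by
  intro data1 data2 _ hpre
  obtain ⟨h1, h2, hin1, hin2⟩ := hpre
  unfold Spec_get_position_wise_common_tokens
  unfold get_position_wise_common_tokens get_position_wise_common_tokens_alt
  simp only []
  -- A's side: items of the insert fold over the union of positions
  rw [union_positions (data1.map Prod.fst) (data2.map Prod.fst) h1 h2]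
  have hP : ((data1.map Prod.fst) ++ (data2.map Prod.fst).filter (fun y => !(PySem.Set.contains (data1.map Prod.fst) y))).Nodup := by
    refine List.Nodup.append h1 ((List.Nodup.filter _) h2) ?_
    intro x hx1 hx2
    have hc : ¬ (PySem.Set.contains (data1.map Prod.fst) x = true) := by
      simpa using (List.mem_filter.mp hx2).2
    exact hc ((PySem.Set.contains_iff _ _).mpr hx1)
  set U := (data1.map Prod.fst) ++ (data2.map Prod.fst).filter (fun y => !(PySem.Set.contains (data1.map Prod.fst) y)) with hU
  have hA := PySem.Dict.items_foldl_insert_fresh (l := U) (k := fun pos => pos)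
    (v := fun pos => PySem.Set.inter (get_tokens_for_position data1 pos) (get_tokens_for_position data2 pos))
    (d := PySem.Dict.empty)
    (by intro a _; exact PySem.Dict.contains_empty a) (by simpa using hP)
  rw [hA, show (PySem.Dict.empty : PySem.Dict Int (PySem.Set String)).items = [] from rfl,
    List.nil_append]
  -- B's side: the seeded dict
  set r1 := data1.foldl (fun r pr => r.insert pr.1 PySem.Set.empty) PySem.Dict.empty with hr1def
  have hr1 : r1.items = data1.map (fun pr => (pr.1, PySem.Set.empty)) := by
    have := PySem.Dict.items_foldl_insert_fresh (l := data1) (k := Prod.fst)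
      (v := fun _ => (PySem.Set.empty : PySem.Set String)) (d := PySem.Dict.empty)
      (by intro a _; exact PySem.Dict.contains_empty a.1) h1
    simpa [hr1def] using this
  have hr1keys : r1.keys = data1.map Prod.fst := by
    simp [PySem.Dict.keys, hr1, Function.comp]
  -- the fill loop
  set r2 := data2.foldl (fun r pr => r.setdefault pr.1 PySem.Set.empty) r1 with hr2def
  have hr2 : r2.items = U.map (fun pos => (pos, PySem.Set.empty)) := by
    have hstep : r2 = (data2.map Prod.fst).foldl (fun r pos => r.setdefault pos PySem.Set.empty) r1 := by
      rw [hr2def, List.foldl_map]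
    rw [hstep, fill_loop (data2.map Prod.fst) r1 h2, hr1, hU, List.map_append, List.map_map]
    congr 1
    have hfe : (data2.map Prod.fst).filter (fun pos => !(r1.contains pos))
        = (data2.map Prod.fst).filter (fun y => !(PySem.Set.contains (data1.map Prod.fst) y)) := by
      apply List.filter_congr
      intro x _
      rw [PySem.Dict.contains_eq_decide_mem_keys, hr1keys]
      congr 1
      simp
    rw [hfe]
  have hr2keys : r2.keys = U := by
    simp [PySem.Dict.keys, hr2, Function.comp_def]
  -- the grouping loop keeps the keys: every common pair's position is already a key
  set common := PySem.Set.inter (pvPairSet data1) (pvPairSet data2) with hcommon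
  have hfstmem : ∀ q ∈ common, q.1 ∈ data1.map Prod.fst := by
    intro q hq
    have hq1 : q ∈ pvPairSet data1 := by
      have : common = (pvPairSet data1).filter (fun q => PySem.Set.contains (pvPairSet data2) q) := by
        simp [hcommon, PySem.Set.inter]
      exact List.mem_of_mem_filter (this ▸ hq)
    rw [pvPairSet_eq] at hq1
    obtain ⟨pr, hpr, hq'⟩ := List.mem_flatMap.mp ((PySem.Set.mem_ofList _ _).mp hq1)
    obtain ⟨t, _, rfl⟩ := List.mem_map.mp hq'
    exact List.mem_map.mpr ⟨pr, hpr, rfl⟩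
  set f := common.foldl (fun r q => r.modify q.1 PySem.Set.empty (fun t => PySem.Set.add t q.2)) r2 with hfdef
  have hfkeys : f.keys = U := by
    rw [hfdef, PySem.Dict.keys_foldl_modify_key, hr2keys, PySem.Set.update_eq_append_filter]
    have : ((PySem.Set.ofList (common.map (fun q => q.1))).filter (fun y => !(PySem.Set.contains U y))) = [] := by
      apply List.filter_eq_nil_iff.mpr
      intro x hx
      obtain ⟨q, hq, rfl⟩ := List.mem_map.mp ((PySem.Set.mem_ofList _ _).mp hx)
      have hmem : q.1 ∈ U := by
        rw [hU]; exact List.mem_append_left _ (hfstmem q hq)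
      simpa using hmem
    rw [this, List.append_nil]
  have hfnodup : f.keys.Nodup := by rw [hfkeys]; exact hP
  -- read the final dict off key by key
  rw [PySem.Dict.items_eq_map_keys f hfnodup PySem.Set.empty, hfkeys]
  apply List.map_congr_left
  intro pos hpos
  have hr2getD : r2.getD pos PySem.Set.empty = PySem.Set.empty := by
    apply PySem.Dict.getD_of_mem_items
    · rw [hr2]; exact List.mem_map.mpr ⟨pos, hpos, rfl⟩
    · rw [hr2keys]; exact hP
  rw [hfdef, getD_group common r2 pos, hr2getD,
    value_eq data1 data2 h1 h2 hin1 hin2 pos]
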